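-- pv_equiv track=rewrite | github.com/dzzk-r/ha-gcp-1 | scripts/tfplan_to_plantuml.py | group_resources
-- ===== SOURCE A (Python) =====
-- def group_resources(resources):
--     """Group resources into packages."""
--     grouped = {
--         "GKE Resources": [],
--         "Compute Resources": [],
--         "IAM Resources": [],
--         "Other Resources": []
--     }
--
--     for resource in resources:
--         resource_type = resource.get("type", "unknown")
--         if "google_container" in resource_type:
--             grouped["GKE Resources"].append(resource)
--         elif "google_compute" in resource_type:
--             grouped["Compute Resources"].append(resource)
--         elif "google_iam" in resource_type:
--             grouped["IAM Resources"].append(resource)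
--         else:
--             grouped["Other Resources"].append(resource)
--
--     return grouped
-- ===== SOURCE B (Python) =====
-- RULES = [
--     ("google_container", "GKE Resources"),
--     ("google_compute", "Compute Resources"),
--     ("google_iam", "IAM Resources"),
-- ]
--
-- def group_resources(resources):
--     """Group resources into packages by successive partitioning.
--
--     Instead of dispatching each resource through a priority chain, peel off
--     each category from the remaining pool with a filter pass; what survives
--     all rules is 'Other Resources'.  First-match priority holds because a
--     resource claimed by an earlier rule is removed from the pool.
--     """
--     grouped = {}
--     remaining = list(resources)
--     for sub, name in RULES:
--         grouped[name] = [r for r in remaining if sub in r.get("type", "unknown")]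
--         remaining = [r for r in remaining if sub not in r.get("type", "unknown")]
--     grouped["Other Resources"] = remaining
--     return grouped
-- ===== Notes on version B (the rewrite author's own statement) =====
-- stated objective: alternative
-- what changed: Replaced the single pass with a per-resource if/elif dispatch by successive partitioning: each category is peeled off the remaining pool with a filter pass (matched resources leave the pool), and whatever survives all rules becomes 'Other Resources'.
import Mathlib
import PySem

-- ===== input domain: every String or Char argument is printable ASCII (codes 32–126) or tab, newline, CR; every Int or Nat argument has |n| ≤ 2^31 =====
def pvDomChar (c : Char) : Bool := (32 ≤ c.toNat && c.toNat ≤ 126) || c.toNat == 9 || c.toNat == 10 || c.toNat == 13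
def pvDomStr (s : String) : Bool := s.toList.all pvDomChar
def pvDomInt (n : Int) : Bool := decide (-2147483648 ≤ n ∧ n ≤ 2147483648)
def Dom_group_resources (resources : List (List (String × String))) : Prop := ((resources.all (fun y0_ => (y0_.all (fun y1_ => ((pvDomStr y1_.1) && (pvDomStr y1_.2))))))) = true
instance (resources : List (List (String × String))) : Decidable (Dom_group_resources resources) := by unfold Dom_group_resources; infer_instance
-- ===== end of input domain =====

-- B replaces A's per-resource if/elif dispatch by successive partitioning: each category is
-- peeled off the remaining pool with a filter pass; what survives all rules is 'Other Resources'.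

-- ===== PORT A =====
def group_resources (resources : List (List (String × String))) : List (String × List (List (String × String))) :=
  let grouped : PySem.Dict String (List (List (String × String))) :=
    ((((PySem.Dict.empty).insert "GKE Resources" []).insert "Compute Resources" []).insert
      "IAM Resources" []).insert "Other Resources" []
  let grouped := resources.foldl (fun d resource =>
    let resource_type := (PySem.Dict.mk resource).getD "type" "unknown"
    if PySem.Str.isIn "google_container" resource_type then
      d.modify "GKE Resources" [] (· ++ [resource])
    else if PySem.Str.isIn "google_compute" resource_type then
      d.modify "Compute Resources" [] (· ++ [resource])
    else if PySem.Str.isIn "google_iam" resource_type then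
      d.modify "IAM Resources" [] (· ++ [resource])
    else
      d.modify "Other Resources" [] (· ++ [resource])) grouped
  grouped.items

-- ===== PORT B =====
def pvRules : List (String × String) :=
  [("google_container", "GKE Resources"),
   ("google_compute", "Compute Resources"),
   ("google_iam", "IAM Resources")]

def group_resources_alt (resources : List (List (String × String))) : List (String × List (List (String × String))) :=
  -- 'for sub, name in RULES: grouped[name] = matched; remaining = unmatched' as a fold over the rules
  let st := pvRules.foldl
    (fun (st : PySem.Dict String (List (List (String × String))) × List (List (String × String))) p =>
      (st.1.insert p.2 (st.2.filter (fun r => PySem.Str.isIn p.1 ((PySem.Dict.mk r).getD "type" "unknown"))),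
       st.2.filter (fun r => !PySem.Str.isIn p.1 ((PySem.Dict.mk r).getD "type" "unknown"))))
    (PySem.Dict.empty, resources)
  (st.1.insert "Other Resources" st.2).items

-- ===== PRECONDITION & SPEC =====
def Spec_group_resources (resources : List (List (String × String))) (out : List (String × List (List (String × String)))) : Prop := out = group_resources_alt resources
instance (resources : List (List (String × String))) (out : List (String × List (List (String × String)))) : Decidable (Spec_group_resources resources out) := by unfold Spec_group_resources; infer_instance

-- ===== CLAIM (what is proved, stated in full; the proofs are below) =====
def Claim_equal_group_resources : Prop := ∀ (resources : List (List (String × String))), Dom_group_resources resources → Spec_group_resources resources (group_resources resources)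

-- ===== LEMMAS AND PROOFS =====

-- shorthand: "sub occurs in resource's type (default 'unknown')"
def pvHit (sub : String) (r : List (String × String)) : Bool :=
  PySem.Str.isIn sub ((PySem.Dict.mk r).getD "type" "unknown")

-- the four-bucket dict as a literal
def pvMk4 (g1 g2 g3 g4 : List (List (String × String))) : PySem.Dict String (List (List (String × String))) :=
  PySem.Dict.mk [("GKE Resources", g1), ("Compute Resources", g2),
                 ("IAM Resources", g3), ("Other Resources", g4)]

-- A's loop, started from the four-key dict with arbitrary bucket contents, appends the
-- priority-filtered sublists to the respective buckets.
theorem pvMod1 (g1 g2 g3 g4 : List (List (String × String))) (r : List (String × String)) :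
    (pvMk4 g1 g2 g3 g4).modify "GKE Resources" [] (· ++ [r]) = pvMk4 (g1 ++ [r]) g2 g3 g4 := rfl
theorem pvMod2 (g1 g2 g3 g4 : List (List (String × String))) (r : List (String × String)) :
    (pvMk4 g1 g2 g3 g4).modify "Compute Resources" [] (· ++ [r]) = pvMk4 g1 (g2 ++ [r]) g3 g4 := rfl
theorem pvMod3 (g1 g2 g3 g4 : List (List (String × String))) (r : List (String × String)) :
    (pvMk4 g1 g2 g3 g4).modify "IAM Resources" [] (· ++ [r]) = pvMk4 g1 g2 (g3 ++ [r]) g4 := rfl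
theorem pvMod4 (g1 g2 g3 g4 : List (List (String × String))) (r : List (String × String)) :
    (pvMk4 g1 g2 g3 g4).modify "Other Resources" [] (· ++ [r]) = pvMk4 g1 g2 g3 (g4 ++ [r]) := rfl

theorem pvA_fold (rs : List (List (String × String))) (g1 g2 g3 g4 : List (List (String × String))) :
    (rs.foldl (fun d resource =>
      let resource_type := (PySem.Dict.mk resource).getD "type" "unknown"
      if PySem.Str.isIn "google_container" resource_type then
        d.modify "GKE Resources" [] (· ++ [resource])
      else if PySem.Str.isIn "google_compute" resource_type then
        d.modify "Compute Resources" [] (· ++ [resource])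
      else if PySem.Str.isIn "google_iam" resource_type then
        d.modify "IAM Resources" [] (· ++ [resource])
      else
        d.modify "Other Resources" [] (· ++ [resource])) (pvMk4 g1 g2 g3 g4)).items
    = (pvMk4 (g1 ++ rs.filter (fun r => pvHit "google_container" r))
             (g2 ++ rs.filter (fun r => !pvHit "google_container" r && pvHit "google_compute" r))
             (g3 ++ rs.filter (fun r => !pvHit "google_container" r && !pvHit "google_compute" r && pvHit "google_iam" r))
             (g4 ++ rs.filter (fun r => !pvHit "google_container" r && !pvHit "google_compute" r && !pvHit "google_iam" r))).items := by
  induction rs generalizing g1 g2 g3 g4 with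
  | nil => simp
  | cons r rs ih =>
    simp only [List.foldl_cons]
    by_cases h1 : PySem.Str.isIn "google_container" ((PySem.Dict.mk r).getD "type" "unknown") = true
    · rw [if_pos h1, pvMod1, ih]
      simp only [pvHit, List.filter_cons, h1, Bool.not_true, Bool.false_and, if_true,
        Bool.false_eq_true, if_false, List.append_assoc, List.singleton_append]
    · rw [Bool.not_eq_true] at h1
      by_cases h2 : PySem.Str.isIn "google_compute" ((PySem.Dict.mk r).getD "type" "unknown") = true
      · rw [if_neg (by rw [h1]; simp), if_pos h2, pvMod2, ih]
        simp only [pvHit, List.filter_cons, h1, h2, Bool.not_true, Bool.not_false,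
            Bool.true_and, Bool.false_and, if_true,
            Bool.false_eq_true, if_false, List.append_assoc, List.singleton_append]
      · rw [Bool.not_eq_true] at h2
        by_cases h3 : PySem.Str.isIn "google_iam" ((PySem.Dict.mk r).getD "type" "unknown") = true
        · rw [if_neg (by rw [h1]; simp), if_neg (by rw [h2]; simp), if_pos h3, pvMod3, ih]
          simp only [pvHit, List.filter_cons, h1, h2, h3, Bool.not_true, Bool.not_false,
            Bool.true_and, Bool.and_false, if_true,
            Bool.false_eq_true, if_false, List.append_assoc, List.singleton_append]
        · rw [Bool.not_eq_true] at h3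
          rw [if_neg (by rw [h1]; simp), if_neg (by rw [h2]; simp), if_neg (by rw [h3]; simp), pvMod4, ih]
          simp only [pvHit, List.filter_cons, h1, h2, h3, Bool.not_false,
            Bool.true_and, Bool.and_false, if_true,
            Bool.false_eq_true, if_false, List.append_assoc, List.singleton_append]

theorem pvBool2 (x y : Bool) : (y && !x) = (!x && y) := by revert x y; decide
theorem pvBool3 (x y z : Bool) : (z && (!y && !x)) = ((!x && !y) && z) := by revert x y z; decide
theorem pvBool4 (x y z : Bool) : (!z && (!y && !x)) = ((!x && !y) && !z) := by revert x y z; decide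

theorem pvItems4 (v1 v2 v3 v4 : List (List (String × String))) :
    ((((PySem.Dict.empty.insert "GKE Resources" v1).insert "Compute Resources" v2).insert
        "IAM Resources" v3).insert "Other Resources" v4).items
    = [("GKE Resources", v1), ("Compute Resources", v2), ("IAM Resources", v3), ("Other Resources", v4)] := rfl

-- B's staged filter passes produce exactly the same four buckets.
theorem pvB_items (rs : List (List (String × String))) :
    group_resources_alt rs
    = (pvMk4 (rs.filter (fun r => pvHit "google_container" r))
             (rs.filter (fun r => !pvHit "google_container" r && pvHit "google_compute" r))
             (rs.filter (fun r => !pvHit "google_container" r && !pvHit "google_compute" r && pvHit "google_iam" r))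
             (rs.filter (fun r => !pvHit "google_container" r && !pvHit "google_compute" r && !pvHit "google_iam" r))).items := by
  simp only [group_resources_alt, pvRules, List.foldl_cons, List.foldl_nil,
    List.filter_filter]
  rw [pvItems4]
  simp only [pvMk4, pvHit]
  congr 1
  congr 1
  · exact congrArg _ (List.filter_congr fun a _ => pvBool2 _ _)
  congr 1
  · exact congrArg _ (List.filter_congr fun a _ => pvBool3 _ _ _)
  · exact congrArg (fun l => [("Other Resources", l)])
      (List.filter_congr fun a _ => pvBool4 _ _ _)

-- ===== VERDICT (by name: the statement is the Claim_ definition above) =====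
theorem group_resources_spec : Claim_equal_group_resources := by
  intro resources _
  unfold Spec_group_resources
  rw [pvB_items]
  show (resources.foldl _ (pvMk4 [] [] [] [])).items = _
  rw [pvA_fold]
  simp
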